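-- pv_equiv track=rewrite | github.com/SayantanDey29/Wireframe_Generator | backend/app/services/sitemap_parser.py | _infer_page_type
-- ===== SOURCE A (Python) =====
-- from typing import Dict, Any, List
--
-- def _infer_page_type(title: str, parts: List[str]) -> str:
--     """Infer the type/purpose of a page from its title and path."""
--     title_lower = title.lower()
--     path_str = "/".join(parts).lower()
--
--     if not parts or title_lower in ["home", "index", ""]:
--         return "Homepage - main landing page with hero, features, CTA"
--     elif any(x in title_lower for x in ["about", "team", "story", "mission"]):
--         return "About page - company info, team, mission, values"
--     elif any(x in title_lower for x in ["contact", "reach", "touch"]):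
--         return "Contact page - contact form, map, info"
--     elif any(x in title_lower for x in ["blog", "news", "articles", "posts"]):
--         return "Blog listing page - article cards, categories, search"
--     elif any(x in title_lower for x in ["product", "item", "detail"]) and len(parts) > 1:
--         return "Product detail page - images, description, CTA, specs"
--     elif any(x in title_lower for x in ["shop", "store", "products", "catalog", "collection"]):
--         return "Shop/catalog page - product grid, filters, sorting"
--     elif any(x in title_lower for x in ["cart", "basket"]):
--         return "Shopping cart page - item list, totals, checkout CTA"
--     elif any(x in title_lower for x in ["checkout", "payment", "order"]):
--         return "Checkout page - form, order summary, payment"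
--     elif any(x in title_lower for x in ["login", "signin", "sign-in"]):
--         return "Login page - email/password form, social login"
--     elif any(x in title_lower for x in ["register", "signup", "sign-up", "join"]):
--         return "Registration page - signup form"
--     elif any(x in title_lower for x in ["pricing", "plans", "subscription"]):
--         return "Pricing page - plan cards, features comparison, CTA"
--     elif any(x in title_lower for x in ["service", "solution", "offering"]):
--         return "Services page - service cards/list, benefits"
--     elif any(x in title_lower for x in ["portfolio", "work", "projects", "gallery"]):
--         return "Portfolio/gallery page - image grid, project cards"
--     elif any(x in title_lower for x in ["faq", "help", "support", "docs"]):
--         return "FAQ/Help page - accordion questions, search, categories"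
--     elif any(x in title_lower for x in ["privacy", "terms", "legal", "policy"]):
--         return "Legal page - formatted text, table of contents"
--     elif any(x in title_lower for x in ["dashboard", "account", "profile", "settings"]):
--         return "Dashboard/Account page - stats, user info, settings"
--     else:
--         return f"Content page - {title} with relevant sections"
-- ===== SOURCE B (Python) =====
-- from typing import List
--
-- _CATEGORIES = [
--     (("about", "team", "story", "mission"), False, "About page - company info, team, mission, values"),
--     (("contact", "reach", "touch"), False, "Contact page - contact form, map, info"),
--     (("blog", "news", "articles", "posts"), False, "Blog listing page - article cards, categories, search"),
--     (("product", "item", "detail"), True, "Product detail page - images, description, CTA, specs"),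
--     (("shop", "store", "products", "catalog", "collection"), False, "Shop/catalog page - product grid, filters, sorting"),
--     (("cart", "basket"), False, "Shopping cart page - item list, totals, checkout CTA"),
--     (("checkout", "payment", "order"), False, "Checkout page - form, order summary, payment"),
--     (("login", "signin", "sign-in"), False, "Login page - email/password form, social login"),
--     (("register", "signup", "sign-up", "join"), False, "Registration page - signup form"),
--     (("pricing", "plans", "subscription"), False, "Pricing page - plan cards, features comparison, CTA"),
--     (("service", "solution", "offering"), False, "Services page - service cards/list, benefits"),
--     (("portfolio", "work", "projects", "gallery"), False, "Portfolio/gallery page - image grid, project cards"),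
--     (("faq", "help", "support", "docs"), False, "FAQ/Help page - accordion questions, search, categories"),
--     (("privacy", "terms", "legal", "policy"), False, "Legal page - formatted text, table of contents"),
--     (("dashboard", "account", "profile", "settings"), False, "Dashboard/Account page - stats, user info, settings"),
-- ]
--
-- # Inverted index: each keyword maps to (priority rank, needs-deep-path flag, page type).
-- _KEYWORD_INDEX = {
--     kw: (rank, deep, result)
--     for rank, (kws, deep, result) in enumerate(_CATEGORIES)
--     for kw in kws
-- }
--
--
-- def _infer_page_type(title: str, parts: List[str]) -> str:
--     """Infer the page type: scan the whole keyword index once, keep the best (lowest) rank."""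
--     title_lower = title.lower()
--     if not parts or title_lower in ("home", "index", ""):
--         return "Homepage - main landing page with hero, features, CTA"
--     best = None
--     for kw, (rank, deep, result) in _KEYWORD_INDEX.items():
--         if kw in title_lower and (not deep or len(parts) > 1):
--             if best is None or rank < best[0]:
--                 best = (rank, result)
--     return best[1] if best is not None else f"Content page - {title} with relevant sections"
-- ===== Notes on version B (the rewrite author's own statement) =====
-- stated objective: alternative
-- what changed: Replaces the 16-branch priority cascade with early returns by an inverted keyword->(rank,needs_deep,result) index built once, scanned in a single full pass keeping the minimum-rank match in an accumulator; the result is the lowest-rank matching keyword, which coincides with the first matching branch of the cascade.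
import Mathlib
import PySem

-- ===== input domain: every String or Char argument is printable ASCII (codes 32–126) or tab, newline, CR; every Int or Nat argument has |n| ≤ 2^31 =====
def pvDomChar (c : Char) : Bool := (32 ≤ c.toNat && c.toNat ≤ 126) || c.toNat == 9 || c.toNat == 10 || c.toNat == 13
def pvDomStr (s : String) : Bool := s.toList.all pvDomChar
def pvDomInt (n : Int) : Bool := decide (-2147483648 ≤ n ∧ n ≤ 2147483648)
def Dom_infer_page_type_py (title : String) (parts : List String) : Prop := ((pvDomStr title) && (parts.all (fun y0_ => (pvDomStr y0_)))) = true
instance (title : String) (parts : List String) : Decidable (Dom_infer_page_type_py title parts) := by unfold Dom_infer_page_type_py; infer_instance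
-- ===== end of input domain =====

-- B replaces A's 16-branch priority cascade by an inverted keyword index (keyword -> rank/result)
-- scanned in one full pass with a min-rank accumulator and no early return; objective: alternative.


-- ===== PORT A =====
-- A binds title_lower = title.lower() once and path_str (unused, never read); here title_lower
-- is written inline as 'PySem.Str.lower title' and the dead path_str binding is omitted.
def infer_page_type_py (title : String) (parts : List String) : String :=
  if parts = [] ∨ PySem.Str.lower title ∈ ["home", "index", ""] then
    "Homepage - main landing page with hero, features, CTA"
  else if ["about", "team", "story", "mission"].any (fun x => PySem.Str.isIn x (PySem.Str.lower title)) then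
    "About page - company info, team, mission, values"
  else if ["contact", "reach", "touch"].any (fun x => PySem.Str.isIn x (PySem.Str.lower title)) then
    "Contact page - contact form, map, info"
  else if ["blog", "news", "articles", "posts"].any (fun x => PySem.Str.isIn x (PySem.Str.lower title)) then
    "Blog listing page - article cards, categories, search"
  else if ["product", "item", "detail"].any (fun x => PySem.Str.isIn x (PySem.Str.lower title)) ∧ 1 < parts.length then
    "Product detail page - images, description, CTA, specs"
  else if ["shop", "store", "products", "catalog", "collection"].any (fun x => PySem.Str.isIn x (PySem.Str.lower title)) then
    "Shop/catalog page - product grid, filters, sorting"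
  else if ["cart", "basket"].any (fun x => PySem.Str.isIn x (PySem.Str.lower title)) then
    "Shopping cart page - item list, totals, checkout CTA"
  else if ["checkout", "payment", "order"].any (fun x => PySem.Str.isIn x (PySem.Str.lower title)) then
    "Checkout page - form, order summary, payment"
  else if ["login", "signin", "sign-in"].any (fun x => PySem.Str.isIn x (PySem.Str.lower title)) then
    "Login page - email/password form, social login"
  else if ["register", "signup", "sign-up", "join"].any (fun x => PySem.Str.isIn x (PySem.Str.lower title)) then
    "Registration page - signup form"
  else if ["pricing", "plans", "subscription"].any (fun x => PySem.Str.isIn x (PySem.Str.lower title)) then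
    "Pricing page - plan cards, features comparison, CTA"
  else if ["service", "solution", "offering"].any (fun x => PySem.Str.isIn x (PySem.Str.lower title)) then
    "Services page - service cards/list, benefits"
  else if ["portfolio", "work", "projects", "gallery"].any (fun x => PySem.Str.isIn x (PySem.Str.lower title)) then
    "Portfolio/gallery page - image grid, project cards"
  else if ["faq", "help", "support", "docs"].any (fun x => PySem.Str.isIn x (PySem.Str.lower title)) then
    "FAQ/Help page - accordion questions, search, categories"
  else if ["privacy", "terms", "legal", "policy"].any (fun x => PySem.Str.isIn x (PySem.Str.lower title)) then
    "Legal page - formatted text, table of contents"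
  else if ["dashboard", "account", "profile", "settings"].any (fun x => PySem.Str.isIn x (PySem.Str.lower title)) then
    "Dashboard/Account page - stats, user info, settings"
  else
    "Content page - " ++ title ++ " with relevant sections"

-- ===== PORT B =====
-- Source B's _CATEGORIES literal
def pvCategories : List (List String × Bool × String) :=
  [ (["about", "team", "story", "mission"], false, "About page - company info, team, mission, values"),
    (["contact", "reach", "touch"], false, "Contact page - contact form, map, info"),
    (["blog", "news", "articles", "posts"], false, "Blog listing page - article cards, categories, search"),
    (["product", "item", "detail"], true, "Product detail page - images, description, CTA, specs"),
    (["shop", "store", "products", "catalog", "collection"], false, "Shop/catalog page - product grid, filters, sorting"),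
    (["cart", "basket"], false, "Shopping cart page - item list, totals, checkout CTA"),
    (["checkout", "payment", "order"], false, "Checkout page - form, order summary, payment"),
    (["login", "signin", "sign-in"], false, "Login page - email/password form, social login"),
    (["register", "signup", "sign-up", "join"], false, "Registration page - signup form"),
    (["pricing", "plans", "subscription"], false, "Pricing page - plan cards, features comparison, CTA"),
    (["service", "solution", "offering"], false, "Services page - service cards/list, benefits"),
    (["portfolio", "work", "projects", "gallery"], false, "Portfolio/gallery page - image grid, project cards"),
    (["faq", "help", "support", "docs"], false, "FAQ/Help page - accordion questions, search, categories"),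
    (["privacy", "terms", "legal", "policy"], false, "Legal page - formatted text, table of contents"),
    (["dashboard", "account", "profile", "settings"], false, "Dashboard/Account page - stats, user info, settings") ]

-- Source B's _KEYWORD_INDEX dict comprehension; the keywords are pairwise distinct, so the dict's
-- items in insertion order are exactly this flat list of (kw, (rank, deep, result)) entries.
def pvKeywordIndex : List (String × Int × Bool × String) :=
  (PySem.List.enumerate pvCategories).flatMap
    (fun e => e.2.1.map (fun kw => (kw, e.1, e.2.2.1, e.2.2.2)))

-- one iteration of Source B's 'for kw, (rank, deep, result) in _KEYWORD_INDEX.items()' loop body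
def pvBestStep (tl : String) (parts : List String)
    (best : Option (Int × String)) (e : String × Int × Bool × String) : Option (Int × String) :=
  if PySem.Str.isIn e.1 tl && (!e.2.2.1 || decide (1 < parts.length)) then
    match best with
    | none => some (e.2.1, e.2.2.2)
    | some (br, bres) => if e.2.1 < br then some (e.2.1, e.2.2.2) else some (br, bres)
  else best

def infer_page_type_py_alt (title : String) (parts : List String) : String :=
  if parts = [] ∨ PySem.Str.lower title ∈ ["home", "index", ""] then
    "Homepage - main landing page with hero, features, CTA"
  else
    match pvKeywordIndex.foldl (pvBestStep (PySem.Str.lower title) parts) none with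
    | some (_, res) => res
    | none => "Content page - " ++ title ++ " with relevant sections"

-- ===== PRECONDITION & SPEC =====
def Spec_infer_page_type_py (title : String) (parts : List String) (out : String) : Prop := out = infer_page_type_py_alt title parts
instance (title : String) (parts : List String) (out : String) : Decidable (Spec_infer_page_type_py title parts out) := by unfold Spec_infer_page_type_py; infer_instance

-- ===== CLAIM (what is proved, stated in full; the proofs are below) =====
def Claim_equal_infer_page_type_py : Prop := ∀ (title : String) (parts : List String), Dom_infer_page_type_py title parts → Spec_infer_page_type_py title parts (infer_page_type_py title parts)

-- ===== LEMMAS AND PROOFS =====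

-- spec-side recursions used only in the proof
def pvExpand (n : Int) : List (List String × Bool × String) → List (String × Int × Bool × String)
  | [] => []
  | (kws, deep, res) :: gs => kws.map (fun kw => (kw, n, deep, res)) ++ pvExpand (n + 1) gs

def pvFirstHit (tl : String) (parts : List String) (n : Int) :
    List (List String × Bool × String) → Option (Int × String)
  | [] => none
  | (kws, deep, res) :: gs =>
      if kws.any (fun kw => PySem.Str.isIn kw tl && (!deep || decide (1 < parts.length))) then some (n, res)
      else pvFirstHit tl parts (n + 1) gs

theorem pvKeywordIndex_eq : pvKeywordIndex = pvExpand 0 pvCategories := by decide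

-- once best holds a rank ≤ every remaining rank, the fold never changes it
theorem pvFold_stall (tl : String) (parts : List String) (br : Int) (bres : String) :
    ∀ (l : List (String × Int × Bool × String)), (∀ e ∈ l, br ≤ e.2.1) →
      l.foldl (pvBestStep tl parts) (some (br, bres)) = some (br, bres) := by
  intro l
  induction l with
  | nil => intro _; rfl
  | cons e rest ih =>
    intro h
    have he : br ≤ e.2.1 := h e (List.mem_cons_self ..)
    have hstep : pvBestStep tl parts (some (br, bres)) e = some (br, bres) := by
      unfold pvBestStep
      have : ¬ e.2.1 < br := not_lt.mpr he
      split <;> simp [this]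
    simp only [List.foldl_cons, hstep]
    exact ih (fun e' he' => h e' (List.mem_cons_of_mem _ he'))

-- folding one expanded category from 'none' yields its rank/result iff some keyword matches
theorem pvFold_group (tl : String) (parts : List String) (n : Int) (deep : Bool) (res : String) :
    ∀ (kws : List String),
      (kws.map (fun kw => (kw, n, deep, res))).foldl (pvBestStep tl parts) none =
        (if kws.any (fun kw => PySem.Str.isIn kw tl && (!deep || decide (1 < parts.length))) then some (n, res) else none) := by
  intro kws
  induction kws with
  | nil => rfl
  | cons k rest ih =>
    by_cases hk : (PySem.Str.isIn k tl && (!deep || decide (1 < parts.length))) = true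
    · simp only [List.map_cons, List.foldl_cons, List.any_cons, hk, Bool.true_or]
      have : pvBestStep tl parts none (k, n, deep, res) = some (n, res) := by
        unfold pvBestStep; rw [if_pos hk]
      rw [this]
      exact pvFold_stall tl parts n res _ (by
        intro e he
        obtain ⟨kw, _, rfl⟩ := List.mem_map.mp he
        exact le_refl n)
    · have : pvBestStep tl parts none (k, n, deep, res) = none := by
        unfold pvBestStep; rw [if_neg hk]
      simp only [List.map_cons, List.foldl_cons, this, ih, List.any_cons,
        Bool.eq_false_iff.mpr hk, Bool.false_or]

-- every rank in the expansion starting at n is ≥ n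
theorem pvExpand_rank_ge (n : Int) :
    ∀ (gs : List (List String × Bool × String)), ∀ e ∈ pvExpand n gs, n ≤ e.2.1 := by
  intro gs
  induction gs generalizing n with
  | nil => intro e he; simp [pvExpand] at he
  | cons g rest ih =>
    intro e he
    obtain ⟨kws, deep, res⟩ := g
    simp only [pvExpand, List.mem_append] at he
    rcases he with h | h
    · obtain ⟨kw, _, rfl⟩ := List.mem_map.mp h
      exact le_refl n
    · exact le_trans (by omega) (ih (n + 1) e h)

-- the whole min-rank fold over the flattened index equals the first matching category
theorem pvFold_firstHit (tl : String) (parts : List String) :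
    ∀ (gs : List (List String × Bool × String)) (n : Int),
      (pvExpand n gs).foldl (pvBestStep tl parts) none = pvFirstHit tl parts n gs := by
  intro gs
  induction gs with
  | nil => intro n; rfl
  | cons g rest ih =>
    intro n
    obtain ⟨kws, deep, res⟩ := g
    simp only [pvExpand, List.foldl_append, pvFirstHit]
    by_cases h : (kws.any (fun kw => PySem.Str.isIn kw tl && (!deep || decide (1 < parts.length)))) = true
    · rw [pvFold_group, if_pos h, if_pos h]
      exact pvFold_stall tl parts n res _ (fun e he => le_trans (by omega) (pvExpand_rank_ge (n + 1) rest e he))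
    · rw [pvFold_group, if_neg h, if_neg h]
      exact ih (n + 1)

-- any distributes over a constant conjunct
theorem pvAny_and_const (l : List String) (f : String → Bool) (c : Bool) :
    (l.any fun k => f k && c) = (l.any f && c) := by
  cases c <;> simp

-- ===== VERDICT (by name: the statement is the Claim_ definition above) =====
theorem infer_page_type_py_spec : Claim_equal_infer_page_type_py := by
  intro title parts _
  unfold Spec_infer_page_type_py infer_page_type_py infer_page_type_py_alt
  by_cases h0 : parts = [] ∨ PySem.Str.lower title ∈ ["home", "index", ""]
  · rw [if_pos h0, if_pos h0]
  · rw [if_neg h0, if_neg h0]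
    rw [pvKeywordIndex_eq, pvFold_firstHit]
    simp only [pvCategories, pvFirstHit, Bool.not_false, Bool.true_or, Bool.and_true,
      Bool.not_true, Bool.false_or, pvAny_and_const]
    by_cases h1 : (["about", "team", "story", "mission"].any (fun x => PySem.Str.isIn x (PySem.Str.lower title))) = true
    · rw [if_pos h1, if_pos h1]
    · rw [if_neg h1, if_neg h1]
      by_cases h2 : (["contact", "reach", "touch"].any (fun x => PySem.Str.isIn x (PySem.Str.lower title))) = true
      · rw [if_pos h2, if_pos h2]
      · rw [if_neg h2, if_neg h2]
        by_cases h3 : (["blog", "news", "articles", "posts"].any (fun x => PySem.Str.isIn x (PySem.Str.lower title))) = true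
        · rw [if_pos h3, if_pos h3]
        · rw [if_neg h3, if_neg h3]
          by_cases h4 : (["product", "item", "detail"].any (fun x => PySem.Str.isIn x (PySem.Str.lower title))) = true ∧ 1 < parts.length
          · rw [if_pos h4, if_pos (Bool.and_eq_true_iff.mpr ⟨h4.1, decide_eq_true h4.2⟩)]
          · rw [if_neg h4, if_neg (fun hb => h4 ⟨(Bool.and_eq_true_iff.mp hb).1, of_decide_eq_true (Bool.and_eq_true_iff.mp hb).2⟩)]
            by_cases h5 : (["shop", "store", "products", "catalog", "collection"].any (fun x => PySem.Str.isIn x (PySem.Str.lower title))) = true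
            · rw [if_pos h5, if_pos h5]
            · rw [if_neg h5, if_neg h5]
              by_cases h6 : (["cart", "basket"].any (fun x => PySem.Str.isIn x (PySem.Str.lower title))) = true
              · rw [if_pos h6, if_pos h6]
              · rw [if_neg h6, if_neg h6]
                by_cases h7 : (["checkout", "payment", "order"].any (fun x => PySem.Str.isIn x (PySem.Str.lower title))) = true
                · rw [if_pos h7, if_pos h7]
                · rw [if_neg h7, if_neg h7]
                  by_cases h8 : (["login", "signin", "sign-in"].any (fun x => PySem.Str.isIn x (PySem.Str.lower title))) = true
                  · rw [if_pos h8, if_pos h8]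
                  · rw [if_neg h8, if_neg h8]
                    by_cases h9 : (["register", "signup", "sign-up", "join"].any (fun x => PySem.Str.isIn x (PySem.Str.lower title))) = true
                    · rw [if_pos h9, if_pos h9]
                    · rw [if_neg h9, if_neg h9]
                      by_cases h10 : (["pricing", "plans", "subscription"].any (fun x => PySem.Str.isIn x (PySem.Str.lower title))) = true
                      · rw [if_pos h10, if_pos h10]
                      · rw [if_neg h10, if_neg h10]
                        by_cases h11 : (["service", "solution", "offering"].any (fun x => PySem.Str.isIn x (PySem.Str.lower title))) = true
                        · rw [if_pos h11, if_pos h11]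
                        · rw [if_neg h11, if_neg h11]
                          by_cases h12 : (["portfolio", "work", "projects", "gallery"].any (fun x => PySem.Str.isIn x (PySem.Str.lower title))) = true
                          · rw [if_pos h12, if_pos h12]
                          · rw [if_neg h12, if_neg h12]
                            by_cases h13 : (["faq", "help", "support", "docs"].any (fun x => PySem.Str.isIn x (PySem.Str.lower title))) = true
                            · rw [if_pos h13, if_pos h13]
                            · rw [if_neg h13, if_neg h13]
                              by_cases h14 : (["privacy", "terms", "legal", "policy"].any (fun x => PySem.Str.isIn x (PySem.Str.lower title))) = true
                              · rw [if_pos h14, if_pos h14]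
                              · rw [if_neg h14, if_neg h14]
                                by_cases h15 : (["dashboard", "account", "profile", "settings"].any (fun x => PySem.Str.isIn x (PySem.Str.lower title))) = true
                                · rw [if_pos h15, if_pos h15]
                                · rw [if_neg h15, if_neg h15]
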